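-- pv_equiv track=rewrite | github.com/angelatto/Algorithm | Kakao-Blind-2017/3.py | solution
-- ===== SOURCE A (Python) =====
-- import collections
--
-- def solution(cacheSize, cities):
--     if cacheSize == 0:
--         return 5 * len(cities)
--
--     # 대소문자 처리
--     def f(city):
--         return city.lower()
--     cities = list(map(f, cities))
--
--     answer = 0
--     cache = collections.OrderedDict()
--     for city in cities:
--         if city in cache: # 캐시에 이미 있다면
--             answer += 1
--             cache[city] += 1
--         else:
--             answer += 5
--             # 버퍼의 공간이 없을 때 - 캐시 교체 작업 여기서부터 !!
--             if len(cache) == cacheSize: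
--                 # 가장 적게 사용된 도시를 찾아서 삭제 -> 캐시에 도시와 함꼐 사용횟수를 저장해야함
--                 li = sorted(cache.items(), key=lambda x: x[1]) # value로 오름차순 정렬
--                 last = cache.pop(li[0][0])
--             cache[city] = 1
--
--     return answer
-- ===== SOURCE B (Python) =====
-- def solution(cacheSize, cities):
--     # Cache kept as ONE list of (count, seq, city) entries that is maintained in
--     # ascending (count, seq) order at all times: the eviction victim is always
--     # pq[0] (O(1) pop), and each access re-inserts its entry at its sorted slot.
--     # No dict and no per-miss sort/scan for the minimum.
--     if cacheSize == 0:
--         return 5 * len(cities)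
--     answer = 0
--     pq = []   # (count, seq, city), sorted ascending by (count, seq)
--     seq = 0
--     for raw in cities:
--         city = raw.lower()
--         i = 0
--         while i < len(pq) and pq[i][2] != city:
--             i += 1
--         if i < len(pq):
--             answer += 1
--             cnt, s, _ = pq.pop(i)
--             entry = (cnt + 1, s, city)
--         else:
--             answer += 5
--             if len(pq) == cacheSize:
--                 pq.pop(0)
--             entry = (1, seq, city)
--         j = 0
--         while j < len(pq) and (pq[j][0] < entry[0] or (pq[j][0] == entry[0] and pq[j][1] < entry[1])):
--             j += 1
--         pq.insert(j, entry)
--         seq += 1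
--     return answer
-- ===== Notes on version B (the rewrite author's own statement) =====
-- stated objective: alternative
-- what changed: A keeps a dict of use-counts and re-sorts its whole item list on every evicting miss to find the victim; B keeps no dict at all and instead maintains the cache as a single list of (count, seq, city) entries permanently sorted ascending by (count, insertion time), so the victim is always the head (O(1) pop) and each access re-inserts its entry at its sorted slot.
import Mathlib
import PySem

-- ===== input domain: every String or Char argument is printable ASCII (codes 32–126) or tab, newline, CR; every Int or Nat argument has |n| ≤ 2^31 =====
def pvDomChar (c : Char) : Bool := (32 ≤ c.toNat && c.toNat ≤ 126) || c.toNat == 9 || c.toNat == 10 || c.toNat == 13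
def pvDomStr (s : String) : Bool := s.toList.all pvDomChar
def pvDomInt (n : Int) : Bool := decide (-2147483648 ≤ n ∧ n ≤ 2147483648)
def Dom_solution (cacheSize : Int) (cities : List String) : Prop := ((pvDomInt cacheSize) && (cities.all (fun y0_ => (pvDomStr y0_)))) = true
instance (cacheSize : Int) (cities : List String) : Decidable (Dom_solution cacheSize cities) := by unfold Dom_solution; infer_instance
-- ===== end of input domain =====

-- B replaces A's dict-of-counts with a per-miss full sort by keeping the cache as ONE
-- list of (count, seq, city) entries maintained in ascending (count, seq) order at all
-- times: the eviction victim is always the head, and each access re-inserts its entry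
-- at its sorted slot (objective: alternative structure, same return value).

-- ===== PORT A =====
-- one loop iteration of A: state = (answer, cache : city -> use-count)
def stepA (cacheSize : Int) (st : Int × PySem.Dict String Int) (city : String) :
    Int × PySem.Dict String Int :=
  if st.2.contains city then
    (st.1 + 1, st.2.modify city 0 (· + 1))
  else
    let cache :=
      if (st.2.size : Int) = cacheSize then
        -- li = sorted(cache.items(), key=lambda x: x[1]); cache.pop(li[0][0])
        match PySem.List.sorted st.2.items (fun x => x.2) false with
        | [] => st.2        -- li[0] unreachable guard (len(cache) == cacheSize ≠ 0 here)
        | p :: _ => st.2.erase p.1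
      else st.2
    (st.1 + 5, cache.insert city 1)

def solution (cacheSize : Int) (cities : List String) : Int :=
  if cacheSize = 0 then 5 * (cities.length : Int)
  else
    ((cities.map (fun c => PySem.Str.lower c)).foldl (stepA cacheSize)
      (0, PySem.Dict.empty)).1

-- ===== PORT B =====
-- the forward scan 'while i < len(pq) and pq[i][2] != city' followed by pq.pop(i):
-- remove the first entry of pq whose city matches, returning it and the remainder
def extractCity (city : String) :
    List (Int × Int × String) → Option ((Int × Int × String) × List (Int × Int × String))
  | [] => none
  | x :: xs =>
    if x.2.2 == city then some (x, xs)
    else match extractCity city xs with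
      | some (e, r) => some (e, x :: r)
      | none => none

-- the forward scan 'while j < len(pq) and pq[j] before entry' followed by pq.insert(j, entry)
def insSorted (e : Int × Int × String) :
    List (Int × Int × String) → List (Int × Int × String)
  | [] => [e]
  | x :: xs =>
    if (x.1 < e.1 || (x.1 == e.1 && x.2.1 < e.2.1)) then x :: insSorted e xs
    else e :: x :: xs

-- one loop iteration of B: state = (answer, pq : sorted list of (count, seq, city), seq)
def stepB (cacheSize : Int) (st : Int × List (Int × Int × String) × Int) (raw : String) :
    Int × List (Int × Int × String) × Int :=
  let city := PySem.Str.lower raw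
  match extractCity city st.2.1 with
  | some (e, rest) => (st.1 + 1, insSorted (e.1 + 1, e.2.1, city) rest, st.2.2 + 1)
  | none =>
    -- pq.pop(0): drop the head (len(pq) == cacheSize > 0 whenever this branch runs)
    let pq := if (st.2.1.length : Int) = cacheSize then st.2.1.drop 1 else st.2.1
    (st.1 + 5, insSorted (1, st.2.2, city) pq, st.2.2 + 1)

def solution_alt (cacheSize : Int) (cities : List String) : Int :=
  if cacheSize = 0 then 5 * (cities.length : Int)
  else (cities.foldl (stepB cacheSize) (0, [], 0)).1

-- ===== PRECONDITION & SPEC =====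
def Spec_solution (cacheSize : Int) (cities : List String) (out : Int) : Prop := out = solution_alt cacheSize cities
instance (cacheSize : Int) (cities : List String) (out : Int) : Decidable (Spec_solution cacheSize cities out) := by unfold Spec_solution; infer_instance

-- ===== CLAIM (what is proved, stated in full; the proofs are below) =====
def Claim_equal_solution : Prop := ∀ (cacheSize : Int) (cities : List String), Dom_solution cacheSize cities → Spec_solution cacheSize cities (solution cacheSize cities)

-- ===== LEMMAS AND PROOFS =====

-- GHOST intermediate model used only by the proofs: A's cache as a dict
-- city -> (use-count, insertion seq); links A's insertion-ordered dict to B's pq.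
def stepG (cacheSize : Int) (st : Int × PySem.Dict String (Int × Int) × Int) (raw : String) :
    Int × PySem.Dict String (Int × Int) × Int :=
  let city := PySem.Str.lower raw
  match st.2.1.get? city with
  | some cs => (st.1 + 1, st.2.1.insert city (cs.1 + 1, cs.2), st.2.2 + 1)
  | none =>
    let cur :=
      if (st.2.1.size : Int) = cacheSize then
        match PySem.List.min2? st.2.1.items (fun kv => kv.2.1) (fun kv => kv.2.2) with
        | some p => st.2.1.erase p.1
        | none => st.2.1
      else st.2.1
    (st.1 + 5, cur.insert city (1, st.2.2), st.2.2 + 1)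

-- forget the timestamp of a ghost-cache entry
def fB : String × (Int × Int) → String × Int := fun kv => (kv.1, kv.2.1)

-- relation between A's cache (items list L) and the ghost cache (items list M) at next seq n
def RelL (L : List (String × Int)) (M : List (String × (Int × Int))) (n : Int) : Prop :=
  L = M.map fB ∧ (M.map (·.1)).Nodup ∧
  (M.map (·.2.2)).Pairwise (· < ·) ∧ ∀ kv ∈ M, kv.2.2 < n

lemma insertBy_map (x : String × (Int × Int)) (l : List (String × (Int × Int))) :
    PySem.List.insertBy (fun a b => decide (a.2 < b.2)) (fB x) (l.map fB)
      = (PySem.List.insertBy (fun a b => decide (a.2.1 < b.2.1)) x l).map fB := by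
  induction l with
  | nil => rfl
  | cons y ys ih =>
    simp only [List.map, PySem.List.insertBy, fB]
    by_cases h : x.2.1 < y.2.1
    · simp [h, fB]
    · simp only [h, decide_false, Bool.false_eq_true, if_false, List.map_cons]
      refine List.cons_eq_cons.mpr ⟨rfl, ?_⟩
      exact ih

lemma sorted_map_fB (M : List (String × (Int × Int))) :
    PySem.List.sorted (M.map fB) (fun x => x.2) false
      = (PySem.List.sorted M (fun x => x.2.1) false).map fB := by
  have key : ∀ (N : List (String × (Int × Int))) (acc : List (String × (Int × Int))),
      List.foldl (fun a x => PySem.List.insertBy (fun p q => decide (p.2 < q.2)) x a)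
        (acc.map fB) (N.map fB)
        = (List.foldl (fun a x => PySem.List.insertBy (fun p q => decide (p.2.1 < q.2.1)) x a)
            acc N).map fB := by
    intro N
    induction N with
    | nil => intro acc; rfl
    | cons y ys ih =>
      intro acc
      simp only [List.map, List.foldl_cons]
      rw [insertBy_map y acc, ih]
  simpa [PySem.List.sorted] using key M []

-- the min?-style fold step (keeps the FIRST minimum)
def minStep (o : Option (String × (Int × Int))) (x : String × (Int × Int)) :
    Option (String × (Int × Int)) :=
  match o with
  | none => some x
  | some m => if x.2.1 < m.2.1 then some x else some m

lemma head?_insertBy (x : String × (Int × Int)) (acc : List (String × (Int × Int))) :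
    (PySem.List.insertBy (fun a b => decide (a.2.1 < b.2.1)) x acc).head? = minStep acc.head? x := by
  cases acc with
  | nil => rfl
  | cons y ys =>
    simp only [PySem.List.insertBy, minStep, List.head?]
    by_cases h : x.2.1 < y.2.1 <;> simp [h]

lemma head?_sorted_eq_min? (xs : List (String × (Int × Int))) :
    (PySem.List.sorted xs (fun kv => kv.2.1) false).head? = PySem.List.min? xs (fun kv => kv.2.1) := by
  have key : ∀ (N acc : List (String × (Int × Int))),
      (List.foldl (fun a x => PySem.List.insertBy (fun p q => decide (p.2.1 < q.2.1)) x a)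
        acc N).head? = List.foldl minStep acc.head? N := by
    intro N
    induction N with
    | nil => intro acc; rfl
    | cons y ys ih =>
      intro acc
      simp only [List.foldl_cons]
      rw [ih, head?_insertBy]
  have e1 : PySem.List.min? xs (fun kv => kv.2.1) = List.foldl minStep none xs := by
    unfold PySem.List.min?; congr 1; funext o x; cases o <;> rfl
  rw [e1]
  simpa [PySem.List.sorted] using key xs []

lemma min2?_eq_min? (M : List (String × (Int × Int)))
    (hpw : (M.map (·.2.2)).Pairwise (· < ·)) :
    PySem.List.min2? M (fun kv => kv.2.1) (fun kv => kv.2.2)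
      = PySem.List.min? M (fun kv => kv.2.1) := by
  have hpw' : M.Pairwise (fun a b => a.2.2 < b.2.2) := List.pairwise_map.mp hpw
  have key : ∀ (N : List (String × (Int × Int))) (acc : Option (String × (Int × Int))),
      (∀ m, acc = some m → ∀ y ∈ N, m.2.2 < y.2.2) →
      N.Pairwise (fun a b => a.2.2 < b.2.2) →
      List.foldl (fun acc x =>
        match acc with
        | none => some x
        | some m => if (decide (x.2.1 < m.2.1) || !decide (m.2.1 < x.2.1) && decide (x.2.2 < m.2.2)) = true
            then some x else some m) acc N
      = List.foldl minStep acc N := by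
    intro N
    induction N with
    | nil => intro acc _ _; rfl
    | cons y ys ih =>
      intro acc hacc hp
      have hyrest : ∀ z ∈ ys, y.2.2 < z.2.2 := (List.pairwise_cons.mp hp).1
      have hprest : ys.Pairwise (fun a b => a.2.2 < b.2.2) := (List.pairwise_cons.mp hp).2
      cases acc with
      | none =>
        simp only [List.foldl_cons, minStep]
        exact ih (some y) (by intro m hm; injection hm with hm; subst hm; exact hyrest) hprest
      | some m =>
        have hmy : m.2.2 < y.2.2 := hacc m rfl y (by simp)
        have hnot : ¬ (y.2.2 < m.2.2) := by omega
        simp only [List.foldl_cons, minStep, hnot, decide_false, Bool.and_false, Bool.or_false]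
        by_cases h : y.2.1 < m.2.1
        · simp only [h, decide_true, if_true]
          exact ih (some y) (by intro m' hm'; injection hm' with hm'; subst hm'; exact hyrest) hprest
        · simp only [h, decide_false, if_false]
          exact ih (some m)
            (by intro m' hm' z hz; injection hm' with hm'; subst hm';
                exact lt_trans hmy (hyrest z hz)) hprest
  have e1 : PySem.List.min2? M (fun kv => kv.2.1) (fun kv => kv.2.2)
      = List.foldl (fun acc x =>
          match acc with
          | none => some x
          | some m => if (decide (x.2.1 < m.2.1) || !decide (m.2.1 < x.2.1) && decide (x.2.2 < m.2.2)) = true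
              then some x else some m) none M := by
    unfold PySem.List.min2?; congr 1; funext o x; cases o <;> rfl
  have e2 : PySem.List.min? M (fun kv => kv.2.1) = List.foldl minStep none M := by
    unfold PySem.List.min?; congr 1; funext o x; cases o <;> rfl
  rw [e1, e2]
  exact key M none (by intro m hm; cases hm) hpw'

lemma min?_eq_none_iff' (M : List (String × (Int × Int))) :
    PySem.List.min? M (fun kv => kv.2.1) = none ↔ M = [] :=
  PySem.List.min?_eq_none_iff M _

-- A's sorted-head victim equals the ghost's (count, seq)-min victim.
lemma victim_eq (M : List (String × (Int × Int)))
    (hpw : (M.map (·.2.2)).Pairwise (· < ·)) :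
    (PySem.List.sorted (M.map fB) (fun x => x.2) false).head?
      = Option.map fB (PySem.List.min2? M (fun kv => kv.2.1) (fun kv => kv.2.2)) := by
  rw [sorted_map_fB, min2?_eq_min? M hpw, ← head?_sorted_eq_min?]
  cases PySem.List.sorted M (fun kv => kv.2.1) false <;> rfl

-- a strictly (count, seq)-minimal member is what min2? returns
lemma min2?_eq_of_strict (M : List (String × (Int × Int))) (p : String × (Int × Int))
    (hp : p ∈ M)
    (hmin : ∀ x ∈ M, x ≠ p → (p.2.1 < x.2.1 ∨ (p.2.1 = x.2.1 ∧ p.2.2 < x.2.2))) :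
    PySem.List.min2? M (fun kv => kv.2.1) (fun kv => kv.2.2) = some p := by
  have e1 : PySem.List.min2? M (fun kv => kv.2.1) (fun kv => kv.2.2)
      = List.foldl (fun acc x =>
          match acc with
          | none => some x
          | some m => if (decide (x.2.1 < m.2.1) || !decide (m.2.1 < x.2.1) && decide (x.2.2 < m.2.2)) = true
              then some x else some m) none M := by
    unfold PySem.List.min2?; congr 1; funext o x; cases o <;> rfl
  have key : ∀ (N : List (String × (Int × Int))) (q : String × (Int × Int)),
      (p ∈ N ∨ q = p) → (q = p ∨ q ∈ M) → (∀ x ∈ N, x ∈ M) →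
      List.foldl (fun acc x =>
          match acc with
          | none => some x
          | some m => if (decide (x.2.1 < m.2.1) || !decide (m.2.1 < x.2.1) && decide (x.2.2 < m.2.2)) = true
              then some x else some m) (some q) N = some p := by
    intro N
    induction N with
    | nil =>
      intro q hq _ _
      rcases hq with hq | hq
      · cases hq
      · subst hq; rfl
    | cons y N ih =>
      intro q hq hqM hsub
      have hyM : y ∈ M := hsub y (by simp)
      simp only [List.foldl_cons]
      by_cases hqp : q = p
      · subst hqp
        have hkeep : (decide (y.2.1 < q.2.1) || !decide (q.2.1 < y.2.1) && decide (y.2.2 < q.2.2)) = false := by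
          by_cases hyp : y = q
          · subst hyp; simp
          · rcases hmin y hyM hyp with h | h
            · simp only [Bool.or_eq_false_iff, Bool.and_eq_false_iff]
              constructor
              · simpa using (by omega : ¬ y.2.1 < q.2.1)
              · left; simpa using h
            · simp only [Bool.or_eq_false_iff, Bool.and_eq_false_iff]
              constructor
              · simpa using (by omega : ¬ y.2.1 < q.2.1)
              · right; simpa using (by omega : ¬ y.2.2 < q.2.2)
        simp only [hkeep, Bool.false_eq_true, if_false]
        exact ih q (Or.inr rfl) (Or.inl rfl) (fun x hx => hsub x (by simp [hx]))
      · have hqM' : q ∈ M := hqM.resolve_left hqp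
        have hlt : p.2.1 < q.2.1 ∨ (p.2.1 = q.2.1 ∧ p.2.2 < q.2.2) := hmin q hqM' hqp
        by_cases hyp : y = p
        · subst hyp
          have htake : (decide (y.2.1 < q.2.1) || !decide (q.2.1 < y.2.1) && decide (y.2.2 < q.2.2)) = true := by
            rcases hlt with h | h
            · simp [h]
            · simp only [Bool.or_eq_true, Bool.and_eq_true, decide_eq_true_eq, Bool.not_eq_true',
                decide_eq_false_iff_not]
              right; exact ⟨by omega, h.2⟩
          simp only [htake, if_true]
          exact ih y (Or.inr rfl) (Or.inl rfl) (fun x hx => hsub x (by simp [hx]))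
        · have hpN : p ∈ N := by
            rcases hq with hq | hq
            · rcases List.mem_cons.mp hq with h | h
              · exact absurd h.symm hyp
              · exact h
            · exact absurd hq hqp
          by_cases ht : (decide (y.2.1 < q.2.1) || !decide (q.2.1 < y.2.1) && decide (y.2.2 < q.2.2)) = true
          · simp only [ht, if_true]
            exact ih y (Or.inl hpN) (Or.inr hyM) (fun x hx => hsub x (by simp [hx]))
          · simp only [ht]
            exact ih q (Or.inl hpN) (Or.inr hqM') (fun x hx => hsub x (by simp [hx]))
  rw [e1]
  cases M with
  | nil => cases hp
  | cons x tl =>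
    simp only [List.foldl_cons]
    refine key tl x ?_ (Or.inr (by simp)) (fun z hz => by simp [hz])
    rcases List.mem_cons.mp hp with h | h
    · exact Or.inr h.symm
    · exact Or.inl h

-- key facts transferred through fB
lemma contains_map_fB (M : List (String × (Int × Int))) (c : String) :
    (M.map fB).any (fun p => p.1 == c) = M.any (fun p => p.1 == c) := by
  rw [List.any_map]; rfl

lemma find?_map_fB (M : List (String × (Int × Int))) (c : String) :
    (M.map fB).find? (fun p => p.1 == c) = Option.map fB (M.find? (fun p => p.1 == c)) := by
  rw [List.find?_map]; rfl

-- appending a fresh entry to related (sub)caches preserves the relation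
lemma rel_append (M'' M : List (String × (Int × Int))) (n : Int) (city : String)
    (hsub : M''.Sublist M) (hnd : (M.map (·.1)).Nodup)
    (hpw : (M.map (·.2.2)).Pairwise (· < ·)) (hbd : ∀ kv ∈ M, kv.2.2 < n)
    (hkey : ∀ p ∈ M, p.1 ≠ city) :
    RelL (M''.map fB ++ [(city, 1)]) (M'' ++ [(city, (1, n))]) (n + 1) := by
  have hsubm : ∀ p ∈ M'', p ∈ M := fun p hp => hsub.subset hp
  refine ⟨by rw [List.map_append]; rfl, ?_, ?_, ?_⟩
  · rw [List.map_append, List.nodup_append]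
    refine ⟨(hsub.map (·.1)).nodup hnd, List.nodup_singleton _, ?_⟩
    intro x hx y hy
    obtain ⟨q, hq, rfl⟩ := List.mem_map.mp hx
    obtain rfl : y = city := by simpa using hy
    exact hkey q (hsubm q hq)
  · rw [List.map_append, List.pairwise_append]
    refine ⟨List.Pairwise.sublist (hsub.map (·.2.2)) hpw, List.pairwise_singleton _ _, ?_⟩
    intro x hx y hy
    obtain ⟨q, hq, rfl⟩ := List.mem_map.mp hx
    obtain rfl : y = n := by simpa using hy
    exact hbd q (hsubm q hq)
  · intro kv hkv
    rcases List.mem_append.mp hkv with hkv | hkv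
    · exact lt_trans (hbd kv (hsubm kv hkv)) (by omega)
    · obtain rfl : kv = (city, (1, n)) := by simpa using hkv
      exact (by omega : n < n + 1)

-- one loop step: A preserves RelL against the ghost
lemma step_rel (cs a n : Int) (L : List (String × Int)) (M : List (String × (Int × Int)))
    (h : RelL L M n) (raw : String) :
    ∃ a' L' M',
      stepA cs (a, PySem.Dict.mk L) (PySem.Str.lower raw) = (a', PySem.Dict.mk L') ∧
      stepG cs (a, PySem.Dict.mk M, n) raw = (a', PySem.Dict.mk M', n + 1) ∧
      RelL L' M' (n + 1) := by
  obtain ⟨hL, hnd, hpw, hbd⟩ := h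
  have hlen : L.length = M.length := by simp [hL]
  cases hf : M.find? (fun p => p.1 == PySem.Str.lower raw) with
  | some kv =>
    -- HIT
    have hkv1 : kv.1 = PySem.Str.lower raw := by
      have := List.find?_some hf; simpa using this
    have hkvmem : kv ∈ M := List.mem_of_find?_eq_some hf
    have hanyM : M.any (fun p => p.1 == PySem.Str.lower raw) = true :=
      List.any_eq_true.mpr ⟨kv, hkvmem, by simpa using hkv1⟩
    have hcontA : (PySem.Dict.mk L).contains (PySem.Str.lower raw) = true := by
      simp only [PySem.Dict.contains, hL]
      rw [contains_map_fB]; exact hanyM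
    have hgetA : (PySem.Dict.mk L).get? (PySem.Str.lower raw) = some kv.2.1 := by
      simp only [PySem.Dict.get?, hL]
      rw [find?_map_fB, hf]; rfl
    have hgetB : (PySem.Dict.mk M).get? (PySem.Str.lower raw) = some kv.2 := by
      simp only [PySem.Dict.get?, hf]; rfl
    refine ⟨a + 1,
      L.map (fun p => if p.1 == PySem.Str.lower raw then (PySem.Str.lower raw, kv.2.1 + 1) else p),
      M.map (fun p => if p.1 == PySem.Str.lower raw then (PySem.Str.lower raw, (kv.2.1 + 1, kv.2.2)) else p),
      ?_, ?_, ?_, ?_, ?_, ?_⟩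
    · simp [stepA, hcontA, PySem.Dict.modify, PySem.Dict.getD, hgetA, PySem.Dict.insert]
    · simp [stepG, hgetB, PySem.Dict.insert, PySem.Dict.contains, hanyM]
    · -- L' = M'.map fB
      rw [hL, List.map_map, List.map_map]
      apply List.map_congr_left
      intro p _
      by_cases hpc : p.1 = PySem.Str.lower raw <;> simp [fB, hpc]
    · -- keys unchanged, hence Nodup
      have : (M.map (fun p => if p.1 == PySem.Str.lower raw then
          (PySem.Str.lower raw, (kv.2.1 + 1, kv.2.2)) else p)).map (·.1) = M.map (·.1) := by
        rw [List.map_map]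
        apply List.map_congr_left
        intro p _
        by_cases hpc : p.1 = PySem.Str.lower raw
        · simp [hpc]
        · simp [hpc]
      rw [this]; exact hnd
    · -- seqs unchanged, hence Pairwise
      have hseq : (M.map (fun p => if p.1 == PySem.Str.lower raw then
          (PySem.Str.lower raw, (kv.2.1 + 1, kv.2.2)) else p)).map (·.2.2) = M.map (·.2.2) := by
        rw [List.map_map]
        apply List.map_congr_left
        intro p hp
        by_cases hpc : p.1 = PySem.Str.lower raw
        · have hpkv : p = kv := List.inj_on_of_nodup_map hnd hp hkvmem (by rw [hpc, hkv1])
          simp [hpkv, hkv1]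
        · simp [hpc]
      rw [hseq]; exact hpw
    · -- bound
      intro q hq
      obtain ⟨p, hp, rfl⟩ := List.mem_map.mp hq
      by_cases hpc : p.1 = PySem.Str.lower raw
      · simpa [hpc] using lt_trans (hbd kv hkvmem) (by omega : n < n + 1)
      · simpa [hpc] using lt_trans (hbd p hp) (by omega : n < n + 1)
  | none =>
    -- MISS
    have hkeys : ∀ p ∈ M, p.1 ≠ PySem.Str.lower raw := by
      intro p hp hpc
      have := List.find?_eq_none.mp hf p hp
      simp [hpc] at this
    have hanyM : M.any (fun p => p.1 == PySem.Str.lower raw) = false := by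
      rw [List.any_eq_false]
      intro p hp
      simpa using hkeys p hp
    have hanyL : L.any (fun p => p.1 == PySem.Str.lower raw) = false := by
      rw [hL, contains_map_fB]; exact hanyM
    have hgetB : (PySem.Dict.mk M).get? (PySem.Str.lower raw) = none := by
      simp only [PySem.Dict.get?, hf]; rfl
    by_cases hsz : (M.length : Int) = cs
    · -- EVICTION branch taken by both
      have hszL : ((L.length : Nat) : Int) = cs := by rw [hlen]; exact hsz
      by_cases hMnil : M = []
      · subst hMnil
        have hL0 : L = [] := by simpa using hL
        subst hL0
        refine ⟨a + 5, [(PySem.Str.lower raw, 1)], [(PySem.Str.lower raw, (1, n))], ?_, ?_, ?_⟩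
        · simp [stepA, PySem.Dict.contains, PySem.Dict.insert,
            PySem.Dict.size, PySem.List.sorted, ← hsz]
        · simp [stepG, hgetB, PySem.Dict.insert, PySem.Dict.contains,
            PySem.Dict.size, PySem.List.min2?, ← hsz]
        · exact rel_append [] [] n _ (List.Sublist.refl _) (by simp) (by simp) (by simp) (by simp)
      · -- the victim exists and coincides
        obtain ⟨p, hp⟩ : ∃ p, PySem.List.min2? M (fun kv => kv.2.1) (fun kv => kv.2.2) = some p := by
          rw [min2?_eq_min? _ hpw]
          cases hmin : PySem.List.min? M (fun kv => kv.2.1) with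
          | none => exact absurd ((min?_eq_none_iff' _).mp hmin) hMnil
          | some p => exact ⟨p, rfl⟩
        have hpmem : p ∈ M := PySem.List.min?_mem (by rw [← min2?_eq_min? _ hpw]; exact hp)
        have hhead : (PySem.List.sorted L (fun x => x.2) false).head? = some (fB p) := by
          rw [hL, victim_eq _ hpw, hp]; rfl
        obtain ⟨t, ht⟩ : ∃ t, PySem.List.sorted L (fun x => x.2) false = fB p :: t := by
          cases hs : PySem.List.sorted L (fun x => x.2) false with
          | nil => rw [hs] at hhead; cases hhead
          | cons q t =>
            rw [hs] at hhead
            simp only [List.head?] at hhead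
            exact ⟨t, by rw [Option.some_inj.mp hhead]⟩
        have hanyL2 : (L.filter (fun q => !(q.1 == p.1))).any
            (fun q => q.1 == PySem.Str.lower raw) = false := by
          rw [List.any_eq_false]
          intro q hq
          have hq2 := List.mem_of_mem_filter hq
          rw [hL] at hq2
          obtain ⟨r, hr, rfl⟩ := List.mem_map.mp hq2
          simpa [fB] using hkeys r hr
        have hanyM2 : ((M.filter (fun q => !(q.1 == p.1))).any
            (fun q => q.1 == PySem.Str.lower raw)) = false := by
          rw [List.any_eq_false]
          intro q hq
          simpa using hkeys q (List.mem_of_mem_filter hq)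
        have hLfil : L.filter (fun q => !(q.1 == p.1))
            = (M.filter (fun q => !(q.1 == p.1))).map fB := by
          rw [hL, List.filter_map]; rfl
        refine ⟨a + 5,
          L.filter (fun q => !(q.1 == p.1)) ++ [(PySem.Str.lower raw, 1)],
          M.filter (fun q => !(q.1 == p.1)) ++ [(PySem.Str.lower raw, (1, n))],
          ?_, ?_, ?_⟩
        · have hfb1 : (fB p).1 = p.1 := rfl
          simp only [stepA, PySem.Dict.contains, hanyL, Bool.false_eq_true,
            if_false, PySem.Dict.size, hszL, if_true, ht, PySem.Dict.erase, PySem.Dict.insert,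
            hfb1, hanyL2]
        · simp only [stepG, hgetB, PySem.Dict.size, hsz, if_true, hp,
            PySem.Dict.erase, PySem.Dict.insert, PySem.Dict.contains, hanyM2,
            Bool.false_eq_true, if_false]
        · rw [hLfil]
          exact rel_append _ _ n _ List.filter_sublist hnd hpw hbd hkeys
    · -- NO eviction
      have hszL : ¬ (((L.length : Nat) : Int) = cs) := by rw [hlen]; exact hsz
      refine ⟨a + 5, L ++ [(PySem.Str.lower raw, 1)], M ++ [(PySem.Str.lower raw, (1, n))],
        ?_, ?_, ?_⟩
      · simp only [stepA, PySem.Dict.contains, hanyL, Bool.false_eq_true,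
          if_false, PySem.Dict.size, hszL, PySem.Dict.insert]
      · simp only [stepG, hgetB, PySem.Dict.size, hsz, if_false,
          PySem.Dict.insert, PySem.Dict.contains, hanyM, Bool.false_eq_true, if_false]
      · rw [hL]
        exact rel_append M M n _ (List.Sublist.refl _) hnd hpw hbd hkeys


-- ===== linking the ghost dict to B's sorted list =====

def toE (p : String × (Int × Int)) : Int × Int × String := (p.2.1, p.2.2, p.1)

lemma toE_inj (p q : String × (Int × Int)) (h : toE p = toE q) : p = q := by
  obtain ⟨a, b, c⟩ := p; obtain ⟨d, e, f⟩ := q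
  simp only [toE, Prod.mk.injEq] at h
  simp [h.1, h.2.1, h.2.2]

-- B's ordering on entries
def eLt (a b : Int × Int × String) : Prop := a.1 < b.1 ∨ (a.1 = b.1 ∧ a.2.1 < b.2.1)

lemma ltB_iff (x e : Int × Int × String) :
    (x.1 < e.1 || (x.1 == e.1 && x.2.1 < e.2.1)) = true ↔ eLt x e := by
  simp [eLt]

lemma eLt_trans {a b c : Int × Int × String} (h1 : eLt a b) (h2 : eLt b c) : eLt a c := by
  unfold eLt at *; omega

lemma eLt_of_not_ltB {x e : Int × Int × String}
    (h : ¬ ((x.1 < e.1 || (x.1 == e.1 && x.2.1 < e.2.1)) = true))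
    (hs : x.2.1 ≠ e.2.1) : eLt e x := by
  rw [ltB_iff] at h
  unfold eLt at *; omega

lemma insSorted_perm (e : Int × Int × String) (l : List (Int × Int × String)) :
    (insSorted e l).Perm (e :: l) := by
  induction l with
  | nil => exact List.Perm.refl _
  | cons x xs ih =>
    simp only [insSorted]
    by_cases h : (x.1 < e.1 || (x.1 == e.1 && x.2.1 < e.2.1)) = true
    · simp only [h, if_true]
      exact (ih.cons x).trans (List.Perm.swap e x xs)
    · simp only [h]
      exact List.Perm.refl _

lemma mem_insSorted {y e : Int × Int × String} {l : List (Int × Int × String)}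
    (h : y ∈ insSorted e l) : y = e ∨ y ∈ l := by
  have := (insSorted_perm e l).mem_iff.mp h
  simpa using this

lemma insSorted_pairwise (e : Int × Int × String) (l : List (Int × Int × String))
    (hp : l.Pairwise eLt) (hs : ∀ x ∈ l, x.2.1 ≠ e.2.1) :
    (insSorted e l).Pairwise eLt := by
  induction l with
  | nil => simp [insSorted]
  | cons x xs ih =>
    obtain ⟨hx, hxs⟩ := List.pairwise_cons.mp hp
    simp only [insSorted]
    by_cases h : (x.1 < e.1 || (x.1 == e.1 && x.2.1 < e.2.1)) = true
    · simp only [h, if_true]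
      refine List.pairwise_cons.mpr ⟨?_, ih hxs (fun z hz => hs z (by simp [hz]))⟩
      intro y hy
      rcases mem_insSorted hy with rfl | hy
      · exact (ltB_iff x y).mp h
      · exact hx y hy
    · simp only [h]
      have hex : eLt e x := eLt_of_not_ltB h (hs x (by simp))
      refine List.pairwise_cons.mpr ⟨?_, hp⟩
      intro y hy
      rcases List.mem_cons.mp hy with rfl | hy
      · exact hex
      · exact eLt_trans hex (hx y hy)

lemma extractCity_none {city : String} {l : List (Int × Int × String)}
    (h : extractCity city l = none) : ∀ x ∈ l, x.2.2 ≠ city := by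
  induction l with
  | nil => simp
  | cons x xs ih =>
    intro y hy
    simp only [extractCity] at h
    by_cases hx : x.2.2 == city
    · simp [hx] at h
    · simp only [hx, Bool.false_eq_true, if_false] at h
      rcases List.mem_cons.mp hy with rfl | hy
      · simpa using hx
      · cases he : extractCity city xs with
        | none => exact ih he y hy
        | some p => rw [he] at h; cases h

lemma extractCity_eq_none {city : String} {l : List (Int × Int × String)}
    (h : ∀ x ∈ l, x.2.2 ≠ city) : extractCity city l = none := by
  induction l with
  | nil => rfl
  | cons x xs ih =>
    have hx : (x.2.2 == city) = false := by simpa using h x (by simp)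
    simp only [extractCity, hx, Bool.false_eq_true, if_false]
    rw [ih (fun z hz => h z (by simp [hz]))]

lemma extractCity_spec {city : String} :
    ∀ {l : List (Int × Int × String)} {e : Int × Int × String} {r : List (Int × Int × String)},
    extractCity city l = some (e, r) →
    e.2.2 = city ∧ ∃ u v, l = u ++ e :: v ∧ r = u ++ v := by
  intro l
  induction l with
  | nil => intro e r h; cases h
  | cons x xs ih =>
    intro e r h
    simp only [extractCity] at h
    by_cases hx : (x.2.2 == city) = true
    · simp only [hx, if_true, Option.some.injEq, Prod.mk.injEq] at h
      obtain ⟨rfl, rfl⟩ := h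
      exact ⟨by simpa using hx, [], xs, rfl, rfl⟩
    · simp only [hx] at h
      cases he : extractCity city xs with
      | none => rw [he] at h; cases h
      | some p =>
        rw [he] at h
        obtain ⟨e', r'⟩ := p
        obtain ⟨rfl, rfl⟩ := Prod.mk.injEq .. ▸ Option.some.inj h
        obtain ⟨hc, u, v, hl, hr⟩ := ih he
        exact ⟨hc, x :: u, v, by simp [hl], by simp [hr]⟩

-- a nodup projection separates the middle element from the rest
lemma ne_of_nodup_map_middle {α β : Type} {f : α → β} {u v : List α} {e : α}
    (hnd : ((u ++ e :: v).map f).Nodup) : ∀ x ∈ u ++ v, f x ≠ f e := by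
  rw [List.map_append, List.map_cons, List.nodup_append] at hnd
  obtain ⟨h1, h2, h3⟩ := hnd
  intro x hx hfx
  rcases List.mem_append.mp hx with hx | hx
  · exact h3 (f x) (List.mem_map_of_mem hx) (f e) (by simp) hfx
  · exact (List.nodup_cons.mp h2).1 (by rw [← hfx]; exact List.mem_map_of_mem hx)

-- one loop step: the ghost and B stay synchronised
lemma stepGB (cs a n : Int) (M : List (String × (Int × Int))) (pq : List (Int × Int × String))
    (raw : String)
    (hnd : (M.map (·.1)).Nodup) (hpw : (M.map (·.2.2)).Pairwise (· < ·))
    (hbd : ∀ kv ∈ M, kv.2.2 < n)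
    (hperm : pq.Perm (M.map toE)) (hpq : pq.Pairwise eLt) :
    ∃ a' M' pq', stepG cs (a, PySem.Dict.mk M, n) raw = (a', PySem.Dict.mk M', n + 1)
      ∧ stepB cs (a, pq, n) raw = (a', pq', n + 1)
      ∧ pq'.Perm (M'.map toE) ∧ pq'.Pairwise eLt := by
  have hseqM : (M.map (·.2.2)).Nodup := hpw.imp (fun h => ne_of_lt h)
  have hseqpq : (pq.map (·.2.1)).Nodup := by
    have : (pq.map (·.2.1)).Perm ((M.map toE).map (·.2.1)) := hperm.map _
    rw [List.map_map] at this
    exact this.nodup_iff.mpr (by simpa [toE, Function.comp] using hseqM)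
  have hbdpq : ∀ x ∈ pq, x.2.1 < n := by
    intro x hx
    obtain ⟨q, hq, rfl⟩ := List.mem_map.mp (hperm.mem_iff.mp hx)
    exact hbd q hq
  cases hf : M.find? (fun p => p.1 == PySem.Str.lower raw) with
  | some kv =>
    -- HIT
    have hkv1 : kv.1 = PySem.Str.lower raw := by
      have := List.find?_some hf; simpa using this
    have hkvmem : kv ∈ M := List.mem_of_find?_eq_some hf
    have hanyM : M.any (fun p => p.1 == PySem.Str.lower raw) = true :=
      List.any_eq_true.mpr ⟨kv, hkvmem, by simpa using hkv1⟩
    have hgetB : (PySem.Dict.mk M).get? (PySem.Str.lower raw) = some kv.2 := by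
      simp only [PySem.Dict.get?, hf]; rfl
    -- B finds the entry too
    have hEmem : toE kv ∈ pq := hperm.mem_iff.mpr (List.mem_map_of_mem hkvmem)
    cases he : extractCity (PySem.Str.lower raw) pq with
    | none =>
      exact absurd (by simpa [toE] using hkv1) (extractCity_none he (toE kv) hEmem)
    | some er =>
      obtain ⟨e, r⟩ := er
      obtain ⟨hec, u, v, hpqe, hre⟩ := extractCity_spec he
      -- the extracted entry is exactly kv's
      have hemem : e ∈ pq := by rw [hpqe]; simp
      obtain ⟨q, hqmem, hqe⟩ := List.mem_map.mp (hperm.mem_iff.mp hemem)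
      have hq1 : q.1 = PySem.Str.lower raw := by
        have : (toE q).2.2 = PySem.Str.lower raw := by rw [hqe]; exact hec
        simpa [toE] using this
      have hqkv : q = kv := List.inj_on_of_nodup_map hnd hqmem hkvmem (by rw [hq1, hkv1])
      have he_kv : e = toE kv := by rw [← hqe, hqkv]
      -- ghost result
      set city := PySem.Str.lower raw with hcity
      set M' := M.map (fun p => if p.1 == city then (city, (kv.2.1 + 1, kv.2.2)) else p) with hM'
      set e' : Int × Int × String := (kv.2.1 + 1, kv.2.2, city) with he'
      refine ⟨a + 1, M', insSorted (e.1 + 1, e.2.1, city) r, ?_, ?_, ?_, ?_⟩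
      · simp [stepG, ← hcity, hgetB, PySem.Dict.insert, PySem.Dict.contains, hanyM, hM']
      · simp [stepB, ← hcity, he]
      · -- permutation
        have hee : ((e.1 + 1, e.2.1, city) : Int × Int × String) = e' := by
          rw [he_kv, he']; simp [toE, hkv1]
        obtain ⟨u', v', hMsplit⟩ := List.append_of_mem hkvmem
        have hndsplit : ((u' ++ kv :: v').map (·.1)).Nodup := by rw [← hMsplit]; exact hnd
        have hkeysplit := ne_of_nodup_map_middle hndsplit
        have hgu : u'.map (fun p => if p.1 == city then (city, (kv.2.1 + 1, kv.2.2)) else p) = u' := by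
          rw [show u'.map (fun p => if p.1 == city then (city, (kv.2.1 + 1, kv.2.2)) else p) = u'.map id from
            List.map_congr_left (fun p hp => by
              have := hkeysplit p (List.mem_append_left _ hp)
              rw [hkv1] at this
              simp [this]), List.map_id]
        have hgv : v'.map (fun p => if p.1 == city then (city, (kv.2.1 + 1, kv.2.2)) else p) = v' := by
          rw [show v'.map (fun p => if p.1 == city then (city, (kv.2.1 + 1, kv.2.2)) else p) = v'.map id from
            List.map_congr_left (fun p hp => by
              have := hkeysplit p (List.mem_append_right _ hp)
              rw [hkv1] at this
              simp [this]), List.map_id]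
        have hMmap' : M' = u' ++ (city, (kv.2.1 + 1, kv.2.2)) :: v' := by
          rw [hM', hMsplit, List.map_append, List.map_cons, hgu, hgv]
          have hgkv : (if kv.1 == city then (city, (kv.2.1 + 1, kv.2.2)) else kv)
              = (city, (kv.2.1 + 1, kv.2.2)) := by simp [hkv1]
          rw [hgkv]
        have hMtoE : M'.map toE = u'.map toE ++ e' :: v'.map toE := by
          rw [hMmap', List.map_append, List.map_cons]; rfl
        have hMtoE0 : M.map toE = u'.map toE ++ e :: v'.map toE := by
          rw [hMsplit, List.map_append, List.map_cons, ← he_kv]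
        have h2 : pq.Perm (u'.map toE ++ e :: v'.map toE) := hMtoE0 ▸ hperm
        have h3 : (e :: (u ++ v)).Perm (e :: (u'.map toE ++ v'.map toE)) :=
          List.perm_middle.symm.trans ((hpqe ▸ h2).trans List.perm_middle)
        have hrperm : r.Perm (u'.map toE ++ v'.map toE) := by
          rw [hre]; exact h3.cons_inv
        rw [hee, hMtoE]
        exact (insSorted_perm e' r).trans ((hrperm.cons e').trans List.perm_middle.symm)
      · -- sortedness
        have hrpw : r.Pairwise eLt := by
          have hpq' : (u ++ e :: v).Pairwise eLt := hpqe ▸ hpq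
          rw [hre]
          exact List.Pairwise.sublist
            (List.Sublist.append (List.Sublist.refl u) (List.sublist_cons_self e v)) hpq' 
        have hrseq : ∀ x ∈ r, x.2.1 ≠ (e.1 + 1, e.2.1, city).2.1 := by
          intro x hx
          have : ((u ++ e :: v).map (·.2.1)).Nodup := by rw [← hpqe]; exact hseqpq
          exact ne_of_nodup_map_middle this x (by rw [← hre]; exact hx)
        exact insSorted_pairwise _ _ hrpw hrseq
  | none =>
    -- MISS
    have hkeys : ∀ p ∈ M, p.1 ≠ PySem.Str.lower raw := by
      intro p hp hpc
      have := List.find?_eq_none.mp hf p hp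
      simp [hpc] at this
    have hanyM : M.any (fun p => p.1 == PySem.Str.lower raw) = false := by
      rw [List.any_eq_false]
      intro p hp
      simpa using hkeys p hp
    have hgetB : (PySem.Dict.mk M).get? (PySem.Str.lower raw) = none := by
      simp only [PySem.Dict.get?, hf]; rfl
    have hBnone : extractCity (PySem.Str.lower raw) pq = none := by
      apply extractCity_eq_none
      intro x hx
      obtain ⟨q, hq, rfl⟩ := List.mem_map.mp (hperm.mem_iff.mp hx)
      simpa [toE] using hkeys q hq
    have hlen : pq.length = M.length := by
      rw [hperm.length_eq, List.length_map]
    set city := PySem.Str.lower raw with hcity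
    by_cases hsz : (M.length : Int) = cs
    · -- EVICTION branch taken by both
      have hszpq : ((pq.length : Nat) : Int) = cs := by rw [hlen]; exact hsz
      by_cases hMnil : M = []
      · subst hMnil
        have hpq0 : pq = [] := by simpa using hperm.eq_nil
        subst hpq0
        refine ⟨a + 5, [(city, (1, n))], [(1, n, city)], ?_, ?_, ?_, ?_⟩
        · simp [stepG, ← hcity, hgetB, PySem.Dict.insert, PySem.Dict.contains,
            PySem.Dict.size, PySem.List.min2?, ← hsz]
        · simp [stepB, ← hcity, extractCity, insSorted, ← hsz]
        · exact List.Perm.refl _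
        · simp
      · -- the victim is the head of pq
        cases hpqc : pq with
        | nil =>
          have hM0 : M.length = 0 := by rw [← hlen, hpqc]; rfl
          exact absurd (List.length_eq_zero_iff.mp hM0) hMnil
        | cons m rest =>
          rw [hpqc] at hperm hpq hseqpq hbdpq
          obtain ⟨q, hqmem, hqm⟩ := List.mem_map.mp (hperm.mem_iff.mp (by simp : m ∈ m :: rest))
          have hstrict : ∀ x ∈ M, x ≠ q → (q.2.1 < x.2.1 ∨ (q.2.1 = x.2.1 ∧ q.2.2 < x.2.2)) := by
            intro x hx hne
            have hxE : toE x ∈ m :: rest := hperm.mem_iff.mpr (List.mem_map_of_mem hx)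
            have hxm : toE x ≠ m := by
              intro hc
              exact hne (toE_inj x q (by rw [hc, hqm]))
            have hxrest : toE x ∈ rest := by
              rcases List.mem_cons.mp hxE with h | h
              · exact absurd h hxm
              · exact h
            have helt : eLt m (toE x) := (List.pairwise_cons.mp hpq).1 _ hxrest
            rw [← hqm] at helt
            simpa [eLt, toE] using helt
          have hmin2 : PySem.List.min2? M (fun kv => kv.2.1) (fun kv => kv.2.2) = some q :=
            min2?_eq_of_strict M q hqmem hstrict
          have hanyM2 : ((M.filter (fun z => !(z.1 == q.1))).any
              (fun p => p.1 == city) = false) := by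
            rw [List.any_eq_false]
            intro p hp
            simpa using hkeys p (List.mem_of_mem_filter hp)
          refine ⟨a + 5, M.filter (fun z => !(z.1 == q.1)) ++ [(city, (1, n))],
            insSorted (1, n, city) rest, ?_, ?_, ?_, ?_⟩
          · simp only [stepG, ← hcity, hgetB, PySem.Dict.size, hsz, if_true, hmin2,
              PySem.Dict.erase, PySem.Dict.insert, PySem.Dict.contains, hanyM2,
              Bool.false_eq_true, if_false]
          · have hg : (((m :: rest).length : Nat) : Int) = cs := by rw [← hpqc]; exact hszpq
            rw [hpqc] at hBnone
            simp only [stepB, ← hcity, hBnone, hg, if_true, List.drop_one, List.tail_cons]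
          · -- permutation
            obtain ⟨u', v', hMsplit⟩ := List.append_of_mem hqmem
            have hndsplit : ((u' ++ q :: v').map (·.1)).Nodup := by rw [← hMsplit]; exact hnd
            have hkeysplit := ne_of_nodup_map_middle hndsplit
            have hfil : M.filter (fun z => !(z.1 == q.1)) = u' ++ v' := by
              rw [hMsplit, List.filter_append, List.filter_cons]
              simp only [beq_self_eq_true, Bool.not_true, Bool.false_eq_true, if_false]
              have hu : ∀ z ∈ u', (!(z.1 == q.1)) = true :=
                fun z hz => by simpa using hkeysplit z (List.mem_append_left _ hz)
              have hv : ∀ z ∈ v', (!(z.1 == q.1)) = true :=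
                fun z hz => by simpa using hkeysplit z (List.mem_append_right _ hz)
              rw [List.filter_eq_self.mpr hu, List.filter_eq_self.mpr hv]
            have hMtoE0 : M.map toE = u'.map toE ++ m :: v'.map toE := by
              rw [hMsplit, List.map_append, List.map_cons, hqm]
            have h3 : (m :: rest).Perm (m :: (u'.map toE ++ v'.map toE)) :=
              (hMtoE0 ▸ hperm).trans List.perm_middle
            have hrperm : rest.Perm (u'.map toE ++ v'.map toE) := h3.cons_inv
            have hMtoE : (M.filter (fun (z : String × Int × Int) => !(z.1 == q.1)) ++ [(city, (1, n))]).map toE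
                = (u'.map toE ++ v'.map toE) ++ [(1, n, city)] := by
              rw [List.map_append, hfil, List.map_append]; rfl
            rw [hMtoE]
            refine (insSorted_perm (1, n, city) rest).trans ((hrperm.cons _).trans ?_)
            simpa using (List.perm_middle (a := ((1 : Int), (n : Int), city))
              (l₁ := u'.map toE ++ v'.map toE) (l₂ := [])).symm
          · -- sortedness
            have hrpw : rest.Pairwise eLt := (List.pairwise_cons.mp hpq).2
            refine insSorted_pairwise _ _ hrpw ?_
            intro x hx
            have : x.2.1 < n := hbdpq x (by simp [hx])
            show x.2.1 ≠ n
            omega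
    · -- NO eviction
      have hszpq : ¬ (((pq.length : Nat) : Int) = cs) := by rw [hlen]; exact hsz
      refine ⟨a + 5, M ++ [(city, (1, n))], insSorted (1, n, city) pq, ?_, ?_, ?_, ?_⟩
      · simp only [stepG, ← hcity, hgetB, PySem.Dict.size, hsz, if_false,
          PySem.Dict.insert, PySem.Dict.contains, hanyM, Bool.false_eq_true, if_false]
      · simp only [stepB, ← hcity, hBnone, hszpq, if_false]
      · rw [List.map_append]
        refine (insSorted_perm (1, n, city) pq).trans ((hperm.cons _).trans ?_)
        simpa using (List.perm_middle (a := ((1 : Int), (n : Int), city))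
          (l₁ := M.map toE) (l₂ := [])).symm
      · refine insSorted_pairwise _ _ hpq ?_
        intro x hx
        have : x.2.1 < n := hbdpq x hx
        show x.2.1 ≠ n
        omega

-- combined fold: A's answer = B's answer, through the ghost
lemma fold3 (cs : Int) (raws : List String) :
    ∀ (a n : Int) (L : List (String × Int)) (M : List (String × (Int × Int)))
      (pq : List (Int × Int × String)),
      RelL L M n → pq.Perm (M.map toE) → pq.Pairwise eLt →
      ((raws.map (fun c => PySem.Str.lower c)).foldl (stepA cs) (a, PySem.Dict.mk L)).1
        = (raws.foldl (stepB cs) (a, pq, n)).1 := by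
  induction raws with
  | nil => intro a n L M pq _ _ _; rfl
  | cons raw rest ih =>
    intro a n L M pq h hperm hpq
    obtain ⟨a', L', M', hA, hG, hrel⟩ := step_rel cs a n L M h raw
    obtain ⟨a2, M2, pq', hG2, hB, hperm', hpq'⟩ :=
      stepGB cs a n M pq raw h.2.1 h.2.2.1 h.2.2.2 hperm hpq
    rw [hG] at hG2
    have ha : a' = a2 := congrArg Prod.fst hG2
    have hM : M' = M2 := by
      have := congrArg (fun x => (x.2.1).items) hG2
      simpa [PySem.Dict.items] using this
    subst ha; subst hM
    simp only [List.map, List.foldl_cons, hA, hB]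
    exact ih a' (n + 1) L' M' pq' hrel hperm' hpq'

-- ===== VERDICT (by name: the statement is the Claim_ definition above) =====
theorem solution_spec : Claim_equal_solution := by
  intro cacheSize cities _
  unfold Spec_solution solution solution_alt
  by_cases h : cacheSize = 0
  · simp [h]
  · simp only [h, if_false]
    exact fold3 cacheSize cities 0 0 [] [] []
      ⟨rfl, List.nodup_nil, List.Pairwise.nil, by simp⟩ (List.Perm.refl _) List.Pairwise.nil
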